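-- pv_equiv track=rewrite | github.com/miliar/Code_Jam_Webscraper | solutions_python/Problem_200/4955.py | solve
-- ===== SOURCE A (Python) =====
-- def solve(i):
--   found = False
--   t = int(i)
--   while not found or t > 10 :
--     u = [int(x) for x in list(str(t))]
--     v = sorted(u)
--     w = "".join([str(x) for x in v])
--     if str(t) == w:
--       break
--     else:
--       t -= 1
--   return t
-- ===== SOURCE B (Python) =====
-- def solve(i):
--     t = int(i)
--     p = 1
--     while t // (10 * p) > 0:
--         if (t // (10 * p)) % 10 > (t // p) % 10:
--             t = (t // (10 * p)) * (10 * p) - 1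
--         p *= 10
--     return t
-- ===== Notes on version B (the rewrite author's own statement) =====
-- stated objective: faster
-- what changed: A decrements t one-by-one and re-sorts its digit string until the digits are non-decreasing (O(t) string sorts); B works purely arithmetically in a single right-to-left pass over the digits: at each descent it decrements the prefix and fills the lower positions with nines, O(d) integer operations for d digits.
-- crash fix: On negative i, A raises ValueError (int('-') on the sign character of str(t)); B returns i unchanged, which already has a single non-decreasing digit sequence. — e.g. on solve(-5): A raises ValueError, B returns -5
import Mathlib
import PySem

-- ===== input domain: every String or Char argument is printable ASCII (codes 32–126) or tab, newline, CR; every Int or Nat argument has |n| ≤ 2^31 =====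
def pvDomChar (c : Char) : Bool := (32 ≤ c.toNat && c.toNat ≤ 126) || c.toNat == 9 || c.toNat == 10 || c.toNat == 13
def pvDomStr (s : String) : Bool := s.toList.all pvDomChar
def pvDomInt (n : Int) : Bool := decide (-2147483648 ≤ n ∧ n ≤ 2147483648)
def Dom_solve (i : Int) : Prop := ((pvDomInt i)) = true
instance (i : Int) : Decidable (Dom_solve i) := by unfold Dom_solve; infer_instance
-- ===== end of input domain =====

-- B replaces A's one-by-one countdown with re-sorting of the digit string by a single
-- right-to-left arithmetic pass over the digits (decrement the prefix at a descent, fill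
-- lower positions with nines); objective: faster.

-- ===== PORT A =====
-- A's while loop, fuel-guarded for totality only: for 0 ≤ i the loop body runs at most
-- i.toNat + 1 times (t decreases each iteration and the check succeeds at t = 0).
-- Python's int(x) raises on the '-' character (t < 0); that input is outside Pre_solve,
-- the port uses .getD 0 there.
def solveLoop (fuel : Nat) (found : Bool) (t : Int) : Int :=
  match fuel with
  | 0 => t
  | f + 1 =>
    if !found || t > 10 then
      let u := (PySem.Int.toChars t).map (fun x => (PySem.Int.ofChars? [x]).getD 0)
      let v := PySem.List.sorted u (fun x => x) false
      let w := PySem.Chars.join [] (v.map (fun x => PySem.Int.toChars x))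
      if PySem.Int.toChars t = w then t
      else solveLoop f found (t - 1)
    else t

def solve (i : Int) : Int := solveLoop (i.toNat + 1) false i

-- ===== PORT B =====
-- B's while loop, fuel-guarded for totality only: p is multiplied by 10 each iteration,
-- so for 0 ≤ i the loop runs at most the number of digits of i ≤ i.toNat + 1 times.
def solveAltLoop (fuel : Nat) (t p : Int) : Int :=
  match fuel with
  | 0 => t
  | f + 1 =>
    if PySem.Int.floordiv t (10 * p) > 0 then
      let t' :=
        if PySem.Int.mod (PySem.Int.floordiv t (10 * p)) 10 >
           PySem.Int.mod (PySem.Int.floordiv t p) 10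
        then PySem.Int.floordiv t (10 * p) * (10 * p) - 1
        else t
      solveAltLoop f t' (10 * p)
    else t

def solve_alt (i : Int) : Int := solveAltLoop (i.toNat + 1) i 1

-- ===== PRECONDITION & SPEC =====
-- Pre_solve: Python A raises ValueError on negative i (int('-')); it returns on all i ≥ 0.
def Pre_solve (i : Int) : Prop := 0 ≤ i
instance (i : Int) : Decidable (Pre_solve i) := by unfold Pre_solve; infer_instance
def pvWitness_solve : Int := (100)

-- On negative i, A raises ValueError (int('-') on the sign character of str(t));
-- B returns i unchanged, which already has a single non-decreasing digit sequence.
def Raises_solve (i : Int) : Prop := i < 0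
instance (i : Int) : Decidable (Raises_solve i) := by unfold Raises_solve; infer_instance
def pvRaiseWitness_solve : Int := (-5)
def pvRaiseWitnessOut_solve : Int := -5

def Spec_solve (i : Int) (out : Int) : Prop := out = solve_alt i
instance (i : Int) (out : Int) : Decidable (Spec_solve i out) := by unfold Spec_solve; infer_instance

-- ===== CLAIM (what is proved, stated in full; the proofs are below) =====
def Claim_equal_solve : Prop := ∀ (i : Int), Dom_solve i → Pre_solve i → Spec_solve i (solve i)
def Claim_raises_solve : Prop := (∀ (i : Int), Dom_solve i → Raises_solve i → ¬ Pre_solve i) ∧ (Dom_solve (pvRaiseWitness_solve) ∧ Raises_solve (pvRaiseWitness_solve) ∧ solve_alt (pvRaiseWitness_solve) = pvRaiseWitnessOut_solve)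

-- ===== LEMMAS AND PROOFS =====

-- `ndN n`: the decimal digits of n are non-decreasing read most-significant first
-- (in the little-endian digit list each later digit is ≤ the earlier one).
def ndN (n : Nat) : Prop := (Nat.digits 10 n).Pairwise (fun a b => b ≤ a)

lemma ndN_zero : ndN 0 := by simp [ndN]

-- k-th little-endian digit of n
lemma digits_getD (k n : Nat) : (Nat.digits 10 n).getD k 0 = n / 10 ^ k % 10 := by
  induction k generalizing n with
  | zero =>
    rcases Nat.eq_zero_or_pos n with h | h
    · simp [h]
    · rw [Nat.digits_def' (by norm_num) h]; simp
  | succ k ih =>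
    rcases Nat.eq_zero_or_pos n with h | h
    · simp [h]
    · rw [Nat.digits_def' (by norm_num) h]
      simp only [List.getD_cons_succ, ih]
      rw [Nat.div_div_eq_div_mul, ← pow_succ']

lemma digits_getElem (n k : Nat) (hk : k < (Nat.digits 10 n).length) :
    (Nat.digits 10 n)[k] = n / 10 ^ k % 10 := by
  rw [← digits_getD k n, List.getD_eq_getElem _ _ hk]

lemma ndN_iff (n : Nat) : ndN n ↔ ∀ k, n / 10 ^ (k + 1) % 10 ≤ n / 10 ^ k % 10 := by
  unfold ndN
  rw [List.pairwise_iff_getElem]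
  constructor
  · intro h k
    by_cases hk : k + 1 < (Nat.digits 10 n).length
    · have := h k (k+1) (by omega) hk (by omega)
      rwa [digits_getElem n k (by omega), digits_getElem n (k+1) hk] at this
    · have hlen : n < 10 ^ (k + 1) := by
        calc n < 10 ^ (Nat.digits 10 n).length := Nat.lt_base_pow_length_digits (by norm_num)
        _ ≤ 10 ^ (k+1) := Nat.pow_le_pow_right (by norm_num) (by omega)
      have : n / 10 ^ (k + 1) = 0 := Nat.div_eq_of_lt hlen
      simp [this]
  · intro h i j hi hj hij
    have adj : ∀ m (_ : m + 1 < (Nat.digits 10 n).length),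
        (Nat.digits 10 n)[m+1] ≤ (Nat.digits 10 n)[m] := by
      intro m hm
      rw [digits_getElem n m (by omega), digits_getElem n (m+1) hm]
      exact h m
    clear h
    induction j with
    | zero => omega
    | succ j ihj =>
      rcases Nat.lt_or_ge i j with h' | h'
      · exact le_trans (adj j hj) (ihj (by omega) (by omega) adj)
      · have : i = j := by omega
        subst this
        exact adj i hj

-- bridge from core's Nat.toDigits (used by PySem.Int.toChars) to Nat.digits
lemma toDigitsCore_eq (f : Nat) : ∀ n ds, 0 < f → n < 10 ^ f →
    Nat.toDigitsCore 10 f n ds =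
      (if n = 0 then ['0'] else (Nat.digits 10 n).reverse.map Nat.digitChar) ++ ds := by
  induction f with
  | zero => intro n ds h; omega
  | succ f ih =>
    intro n ds _ hn
    rw [Nat.toDigitsCore]
    by_cases h0 : n = 0
    · subst h0; simp [Nat.digitChar]
    · by_cases h1 : n / 10 = 0
      · simp only [h1, if_true, if_neg h0]
        rw [Nat.digits_def' (by norm_num) (by omega)]
        rw [h1, Nat.digits_zero]
        simp
      · simp only [h1, if_false]
        have hf : 0 < f := by
          rcases Nat.eq_zero_or_pos f with hf | hf
          · subst hf; simp at hn; omega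
          · exact hf
        rw [ih (n / 10) _ hf (by
          have : n < 10 * 10 ^ f := by rw [← pow_succ']; exact hn
          omega)]
        rw [if_neg h1]
        rw [Nat.digits_def' (by norm_num : (1:Nat) < 10) (by omega : 0 < n)]
        simp [h0]

lemma toDigits_eq (n : Nat) (h : 0 < n) :
    Nat.toDigits 10 n = (Nat.digits 10 n).reverse.map Nat.digitChar := by
  unfold Nat.toDigits
  rw [toDigitsCore_eq (n+1) n [] (by omega)
    (lt_of_lt_of_le (Nat.lt_pow_self (by norm_num)) (Nat.pow_le_pow_right (by norm_num) (by omega)))]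
  rw [if_neg (by omega)]
  simp

lemma dcg : ∀ d : Nat, d < 10 → (PySem.Int.ofChars? [Nat.digitChar d]).getD 0 = (d : Int) := by decide
lemma tc_small : ∀ d : Nat, d < 10 → PySem.Int.toChars ((d : Nat) : Int) = [Nat.digitChar d] := by decide
lemma dc_le : ∀ d : Nat, d < 10 → ∀ e : Nat, e < 10 → (Nat.digitChar d ≤ Nat.digitChar e ↔ d ≤ e) := by decide

lemma toChars_natCast (n : Nat) : PySem.Int.toChars ((n : Nat) : Int) = Nat.toDigits 10 n := by
  simp [PySem.Int.toChars]

-- A's break test on a non-negative value is exactly ndN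
lemma check_iff (n : Nat) :
    (PySem.Int.toChars (n : Int) =
      PySem.Chars.join [] ((PySem.List.sorted
        ((PySem.Int.toChars (n : Int)).map (fun x => (PySem.Int.ofChars? [x]).getD 0))
        (fun x => x) false).map (fun x => PySem.Int.toChars x)))
    ↔ ndN n := by
  rcases Nat.eq_zero_or_pos n with h0 | h0
  · subst h0
    constructor
    · intro _; simp [ndN]
    · intro _; decide
  · have hd10 : ∀ d ∈ Nat.digits 10 n, d < 10 := fun _ h => Nat.digits_lt_base (by norm_num) h
    have hcs : PySem.Int.toChars (n : Int) = (Nat.digits 10 n).reverse.map Nat.digitChar := by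
      rw [toChars_natCast, toDigits_eq n h0]
    set ds := (Nat.digits 10 n).reverse with hds
    have hds10 : ∀ d ∈ ds, d < 10 := fun d hd => hd10 d (List.mem_reverse.mp hd)
    have hu : (PySem.Int.toChars (n : Int)).map (fun x => (PySem.Int.ofChars? [x]).getD 0)
        = ds.map (fun d : Nat => (d : Int)) := by
      rw [hcs, List.map_map]
      apply List.map_congr_left
      intro d hd
      exact dcg d (hds10 d hd)
    rw [hu]
    have hu_mem : ∀ x ∈ ds.map (fun d : Nat => (d : Int)), ∃ d : Nat, d < 10 ∧ x = (d : Int) := by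
      intro x hx
      rw [List.mem_map] at hx
      obtain ⟨d, hd, rfl⟩ := hx
      exact ⟨d, hds10 d hd, rfl⟩
    set u := ds.map (fun d : Nat => (d : Int)) with huu
    set v := PySem.List.sorted u (fun x => x) false with hv
    have hv_mem : ∀ x ∈ v, ∃ d : Nat, d < 10 ∧ x = (d : Int) := by
      intro x hx
      exact hu_mem x ((PySem.List.mem_sorted u (fun x => x) false x).mp hx)
    have hw : (v.map (fun x => PySem.Int.toChars x)) =
        (v.map (fun x => Nat.digitChar x.toNat)).map (fun c => [c]) := by
      rw [List.map_map]
      apply List.map_congr_left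
      intro x hx
      obtain ⟨d, hd, rfl⟩ := hv_mem x hx
      simp only [Function.comp]
      rw [tc_small d hd]
      simp
    rw [hw, PySem.Chars.join_nil_singletons]
    constructor
    · intro heq
      have hvp : v.Pairwise (fun a b => a ≤ b) := by
        simpa using PySem.List.sorted_pairwise u (fun x => x)
      have hcp : (v.map (fun x => Nat.digitChar x.toNat)).Pairwise (fun a b => a ≤ b) := by
        rw [List.pairwise_map]
        refine hvp.imp_of_mem ?_
        intro a b ha hb hab
        obtain ⟨d, hd, rfl⟩ := hv_mem a ha
        obtain ⟨e, he, rfl⟩ := hv_mem b hb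
        simp only [Int.toNat_natCast]
        exact (dc_le d hd e he).mpr (by exact_mod_cast hab)
      rw [← heq, hcs, List.pairwise_map] at hcp
      unfold ndN
      rw [← List.pairwise_reverse]
      refine hcp.imp_of_mem ?_
      intro a b ha hb hab
      exact (dc_le a (hds10 a ha) b (hds10 b hb)).mp hab
    · intro hnd
      have hdsp : ds.Pairwise (fun a b => a ≤ b) := by
        rw [hds, List.pairwise_reverse]; exact hnd
      have hup : u.Pairwise (fun a b => (fun x => x) a ≤ (fun x => x) b) := by
        rw [huu, List.pairwise_map]
        exact hdsp.imp (fun hab => by simpa using hab)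
      have hveq : v = u := PySem.List.sorted_eq_self_of_pairwise u (fun x => x) hup
      rw [hveq, huu, List.map_map, hcs]
      apply (List.map_congr_left ?_).symm
      intro d _
      simp

-- A's loop computes the greatest m ≤ n with non-decreasing digits
lemma solveLoop_spec (f : Nat) : ∀ n : Nat, n < f →
    ∃ m : Nat, solveLoop f false (n : Int) = (m : Int) ∧ m ≤ n ∧ ndN m ∧
      ∀ x, m < x → x ≤ n → ¬ ndN x := by
  induction f with
  | zero => intro n h; omega
  | succ f ih =>
    intro n hn
    rw [solveLoop]
    simp only [Bool.not_false, Bool.true_or, if_true]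
    by_cases hc : ndN n
    · rw [if_pos ((check_iff n).mpr hc)]
      exact ⟨n, rfl, le_refl n, hc, fun x h1 h2 => absurd (by omega : x = n) (by intro he; subst he; omega)⟩
    · rw [if_neg (fun h => hc ((check_iff n).mp h))]
      have hn1 : 1 ≤ n := by
        by_contra h
        have : n = 0 := by omega
        subst this
        exact hc ndN_zero
      have hcast : (n : Int) - 1 = ((n - 1 : Nat) : Int) := by push_cast [Nat.cast_sub hn1]; ring
      rw [hcast]
      obtain ⟨m, hm, hm1, hm2, hm3⟩ := ih (n - 1) (by omega)
      refine ⟨m, hm, by omega, hm2, fun x h1 h2 => ?_⟩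
      rcases Nat.lt_or_ge x n with h' | h'
      · exact hm3 x h1 (by omega)
      · have : x = n := by omega
        subst this; exact hc

lemma ndN_of_inv {n j : Nat} (hinv : ∀ k, k < j → n / 10 ^ (k + 1) % 10 ≤ n / 10 ^ k % 10)
    (hb : n < 10 ^ j) : ndN n := by
  rw [ndN_iff]
  intro k
  rcases Nat.lt_or_ge k j with h | h
  · exact hinv k h
  · have : n < 10 ^ (k + 1) := lt_of_lt_of_le hb (Nat.pow_le_pow_right (by norm_num) (by omega))
    rw [Nat.div_eq_of_lt this]
    simp

lemma div_pred (c B : Nat) (hc : 0 < c) (hB : 0 < B) : (c * B - 1) / B = c - 1 := by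
  apply Nat.div_eq_of_lt_le
  · rw [Nat.sub_mul, Nat.one_mul]
    exact Nat.sub_le_sub_left hB (c * B)
  · have h : (c - 1 + 1) * B = c * B := by congr 1; omega
    rw [h]
    exact Nat.sub_lt (Nat.mul_pos hc hB) one_pos

lemma dig9 (a k : Nat) (ha : 0 < a) : (a * 10 ^ (k + 1) - 1) / 10 ^ k % 10 = 9 := by
  have e : a * 10 ^ (k + 1) = (a * 10) * 10 ^ k := by ring
  rw [e, div_pred (a * 10) (10 ^ k) (by omega) (Nat.pow_pos (by norm_num))]
  omega

-- every number strictly between B's "decrement prefix, fill with 9s" jump target and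
-- the current value has a digit descent at the same boundary
lemma no_nd_between (n j x : Nat)
    (hfix : n / 10 ^ j % 10 < n / 10 ^ (j + 1) % 10)
    (hx1 : n / 10 ^ (j + 1) * 10 ^ (j + 1) - 1 < x) (hx2 : x ≤ n) : ¬ ndN x := by
  intro hnd
  have hPpos : (0:Nat) < 10 ^ (j + 1) := Nat.pow_pos (by norm_num)
  have hBpos : (0:Nat) < 10 ^ j := Nat.pow_pos (by norm_num)
  have hxP : x / 10 ^ (j + 1) = n / 10 ^ (j + 1) := by
    apply Nat.div_eq_of_lt_le
    · omega
    · have e1 : (n / 10 ^ (j + 1) + 1) * 10 ^ (j + 1)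
          = n / 10 ^ (j + 1) * 10 ^ (j + 1) + 10 ^ (j + 1) := Nat.succ_mul _ _
      have e2 : 10 ^ (j + 1) * (n / 10 ^ (j + 1)) + n % 10 ^ (j + 1) = n := Nat.div_add_mod n _
      have e3 : n % 10 ^ (j + 1) < 10 ^ (j + 1) := Nat.mod_lt _ hPpos
      have e4 : 10 ^ (j + 1) * (n / 10 ^ (j + 1)) = n / 10 ^ (j + 1) * 10 ^ (j + 1) :=
        Nat.mul_comm _ _
      omega
  have hdig : x / 10 ^ (j + 1) % 10 ≤ x / 10 ^ j % 10 := (ndN_iff x).mp hnd j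
  rw [hxP] at hdig
  have hA : x / 10 ^ j % 10 = x % (10 ^ j * 10) / 10 ^ j := (Nat.mod_mul_right_div_self x (10 ^ j) 10).symm
  have hB : n / 10 ^ j % 10 = n % (10 ^ j * 10) / 10 ^ j := (Nat.mod_mul_right_div_self n (10 ^ j) 10).symm
  have hPe : (10:Nat) ^ (j + 1) = 10 ^ j * 10 := pow_succ 10 j
  rw [hPe] at hxP
  have hlx : x % (10 ^ j * 10) ≤ n % (10 ^ j * 10) := by
    have d1 := Nat.div_add_mod x (10 ^ j * 10)
    have d2 := Nat.div_add_mod n (10 ^ j * 10)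
    rw [hxP] at d1
    omega
  have h1 : n % (10 ^ j * 10) / 10 ^ j + 1 ≤ x % (10 ^ j * 10) / 10 ^ j := by
    rw [← hA, ← hB]
    omega
  have b1 := Nat.div_add_mod (n % (10 ^ j * 10)) (10 ^ j)
  have b2 : n % (10 ^ j * 10) % 10 ^ j < 10 ^ j := Nat.mod_lt _ hBpos
  have b4 : (n % (10 ^ j * 10) / 10 ^ j + 1) * 10 ^ j ≤ (x % (10 ^ j * 10) / 10 ^ j) * 10 ^ j :=
    Nat.mul_le_mul_right _ h1
  have b5 : (n % (10 ^ j * 10) / 10 ^ j + 1) * 10 ^ j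
      = (n % (10 ^ j * 10) / 10 ^ j) * 10 ^ j + 10 ^ j := Nat.succ_mul _ _
  have b6 : (x % (10 ^ j * 10) / 10 ^ j) * 10 ^ j ≤ x % (10 ^ j * 10) := Nat.div_mul_le_self _ _
  have b7 : 10 ^ j * (n % (10 ^ j * 10) / 10 ^ j) = (n % (10 ^ j * 10) / 10 ^ j) * 10 ^ j :=
    Nat.mul_comm _ _
  omega

-- B's loop invariant: positions below p are settled and non-decreasing; it returns
-- the greatest m ≤ n with non-decreasing digits
lemma solveAltLoop_spec (f : Nat) : ∀ n j : Nat,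
    (∀ k, k < j → n / 10 ^ (k + 1) % 10 ≤ n / 10 ^ k % 10) →
    n < 10 ^ (j + f) →
    ∃ m : Nat, solveAltLoop f (n : Int) ((10 ^ j : Nat) : Int) = (m : Int) ∧ m ≤ n ∧ ndN m ∧
      ∀ x, m < x → x ≤ n → ¬ ndN x := by
  induction f with
  | zero =>
    intro n j hinv hb
    exact ⟨n, rfl, le_refl n, ndN_of_inv hinv (by simpa using hb),
      fun x h1 h2 => absurd h1 (by omega)⟩
  | succ f ih =>
    intro n j hinv hb
    rw [solveAltLoop]
    have hc10 : (10:Int) * ((10 ^ j : Nat) : Int) = ((10 ^ (j + 1) : Nat) : Int) := by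
      push_cast [pow_succ]; ring
    rw [hc10]
    have hg1 : PySem.Int.floordiv ((n : Nat) : Int) ((10 ^ (j + 1) : Nat) : Int)
        = ((n / 10 ^ (j + 1) : Nat) : Int) := PySem.Int.floordiv_natCast n _
    have hg2 : PySem.Int.floordiv ((n : Nat) : Int) ((10 ^ j : Nat) : Int)
        = ((n / 10 ^ j : Nat) : Int) := PySem.Int.floordiv_natCast n _
    rw [hg1, hg2]
    by_cases hg : 0 < n / 10 ^ (j + 1)
    · rw [if_pos (by exact_mod_cast hg)]
      have hm1 : PySem.Int.mod ((n / 10 ^ (j + 1) : Nat) : Int) 10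
          = ((n / 10 ^ (j + 1) % 10 : Nat) : Int) := by
        exact_mod_cast PySem.Int.mod_natCast (n / 10 ^ (j + 1)) 10
      have hm2 : PySem.Int.mod ((n / 10 ^ j : Nat) : Int) 10
          = ((n / 10 ^ j % 10 : Nat) : Int) := by
        exact_mod_cast PySem.Int.mod_natCast (n / 10 ^ j) 10
      rw [hm1, hm2]
      have hbound : n < 10 ^ ((j + 1) + f) := by
        have : j + (f + 1) = (j + 1) + f := by omega
        rwa [this] at hb
      by_cases hfix : n / 10 ^ j % 10 < n / 10 ^ (j + 1) % 10
      · rw [if_pos (by exact_mod_cast hfix)]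
        have hqP : 1 ≤ n / 10 ^ (j + 1) * 10 ^ (j + 1) := by
          have := Nat.mul_pos hg (Nat.pow_pos (show 0 < 10 by norm_num) (n := j + 1))
          omega
        have hcast : ((n / 10 ^ (j + 1) : Nat) : Int) * ((10 ^ (j + 1) : Nat) : Int) - 1
            = ((n / 10 ^ (j + 1) * 10 ^ (j + 1) - 1 : Nat) : Int) := by
          push_cast [Nat.cast_sub hqP]
          ring
        rw [hcast]
        set n' := n / 10 ^ (j + 1) * 10 ^ (j + 1) - 1 with hn'
        have hn'lt : n' < n := by
          have h1 : n / 10 ^ (j + 1) * 10 ^ (j + 1) ≤ n := Nat.div_mul_le_self n _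
          omega
        have hdig9 : ∀ k, k ≤ j → n' / 10 ^ k % 10 = 9 := by
          intro k hk
          have e : n / 10 ^ (j + 1) * 10 ^ (j + 1)
              = (n / 10 ^ (j + 1) * 10 ^ (j - k)) * 10 ^ (k + 1) := by
            rw [mul_assoc, ← pow_add]
            congr 2
            omega
          rw [hn', e]
          exact dig9 _ k (Nat.mul_pos hg (Nat.pow_pos (show 0 < 10 by norm_num) (n := j - k)))
        have hinv' : ∀ k, k < j + 1 → n' / 10 ^ (k + 1) % 10 ≤ n' / 10 ^ k % 10 := by
          intro k hk
          rw [hdig9 k (by omega)]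
          have : n' / 10 ^ (k + 1) % 10 < 10 := Nat.mod_lt _ (by norm_num)
          omega
        obtain ⟨m, hm, hmle, hmnd, hmmax⟩ := ih n' (j + 1) hinv' (by omega)
        refine ⟨m, hm, by omega, hmnd, fun x h1 h2 => ?_⟩
        rcases Nat.lt_or_ge n' x with h' | h'
        · exact no_nd_between n j x hfix (by omega) h2
        · exact hmmax x h1 h'
      · rw [if_neg (by
          intro h
          exact hfix (by exact_mod_cast h))]
        have hinv' : ∀ k, k < j + 1 → n / 10 ^ (k + 1) % 10 ≤ n / 10 ^ k % 10 := by
          intro k hk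
          rcases Nat.lt_or_ge k j with h' | h'
          · exact hinv k h'
          · have : k = j := by omega
            subst this
            omega
        exact ih n (j + 1) hinv' hbound
    · rw [if_neg (by
        intro h
        exact hg (by exact_mod_cast h))]
      refine ⟨n, rfl, le_refl n, ?_, fun x h1 h2 => absurd h1 (by omega)⟩
      have h0 : n / 10 ^ (j + 1) = 0 := Nat.eq_zero_of_not_pos hg
      have hlt : n < 10 ^ (j + 1) := by
        rcases (Nat.div_eq_zero_iff).mp h0 with h' | h'
        · have := Nat.pow_pos (show 0 < 10 by norm_num) (n := j + 1)
          omega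
        · exact h'
      have hinv' : ∀ k, k < j + 1 → n / 10 ^ (k + 1) % 10 ≤ n / 10 ^ k % 10 := by
        intro k hk
        rcases Nat.lt_or_ge k j with h' | h'
        · exact hinv k h'
        · have : k = j := by omega
          subst this
          rw [h0]
          simp
      exact ndN_of_inv hinv' hlt

-- ===== VERDICT (by name: the statement is the Claim_ definition above) =====
theorem solve_spec : Claim_equal_solve := by
  intro i _ hpre
  unfold Spec_solve
  obtain ⟨n, rfl⟩ : ∃ n : Nat, i = (n : Int) := ⟨i.toNat, (Int.toNat_of_nonneg hpre).symm⟩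
  unfold solve solve_alt
  rw [Int.toNat_natCast]
  obtain ⟨a, ha, ha1, ha2, ha3⟩ := solveLoop_spec (n + 1) n (by omega)
  have hone : ((1 : Int)) = (((10 ^ 0 : Nat) : Nat) : Int) := by norm_num
  rw [hone]
  obtain ⟨b, hb, hb1, hb2, hb3⟩ := solveAltLoop_spec (n + 1) n 0 (by omega)
    (by
      have h1 : n < 10 ^ n := Nat.lt_pow_self (by norm_num)
      have h2 : (10:Nat) ^ n ≤ 10 ^ (0 + (n + 1)) := Nat.pow_le_pow_right (by norm_num) (by omega)
      omega)
  rw [ha, hb]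
  have : a = b := by
    rcases lt_trichotomy a b with h | h | h
    · exact absurd hb2 (ha3 b h hb1)
    · exact h
    · exact absurd ha2 (hb3 a h ha1)
  rw [this]

def solve_raises : Claim_raises_solve := by
  unfold Claim_raises_solve
  exact ⟨fun i _ hr hp => by unfold Raises_solve at hr; unfold Pre_solve at hp; omega, by decide⟩
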